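-- pv_equiv track=rewrite | github.com/moratorium08/Wavelet-Exp | compress.py | cum_energies
-- ===== SOURCE A (Python) =====
-- def cum_energies(vec):
--     data = [0]
--     bef = vec[0][0] + 1
--     for x in vec:
--         assert x[0] <= bef
--         bef = x[0]
--         data.append(data[-1] + x[0])
--     return data
-- ===== SOURCE B (Python) =====
-- def cum_energies(vec):
--     assert all(vec[i][0] <= vec[i - 1][0] for i in range(1, len(vec)))
--     s = sum(x[0] for x in vec)
--     rev = [s]
--     for x in reversed(vec):
--         s -= x[0]
--         rev.append(s)
--     rev.reverse()
--     return rev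
-- ===== Notes on version B (the rewrite author's own statement) =====
-- stated objective: alternative
-- what changed: B validates the non-increasing order with an index-pair assertion, computes the total of first coordinates once, and builds the prefix-sum list BACK-TO-FRONT by subtracting each first coordinate from a running suffix total while traversing vec in reverse, then reverses the result; A builds the same list front-to-back with an interleaved assert and data[-1] append.
import Mathlib
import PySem

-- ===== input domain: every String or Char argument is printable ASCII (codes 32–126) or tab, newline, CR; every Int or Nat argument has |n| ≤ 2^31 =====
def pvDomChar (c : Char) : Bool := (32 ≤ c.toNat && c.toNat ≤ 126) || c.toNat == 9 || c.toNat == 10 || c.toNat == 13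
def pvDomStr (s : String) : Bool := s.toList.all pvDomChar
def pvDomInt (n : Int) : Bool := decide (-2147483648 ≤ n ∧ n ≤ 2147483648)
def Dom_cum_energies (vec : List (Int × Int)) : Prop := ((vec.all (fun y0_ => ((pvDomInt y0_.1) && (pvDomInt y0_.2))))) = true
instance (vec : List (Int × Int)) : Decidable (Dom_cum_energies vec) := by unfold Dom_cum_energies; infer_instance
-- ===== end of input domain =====

-- B builds the prefix-sum list back-to-front: it sums the first coordinates once and
-- subtracts them from a running suffix total while traversing vec in reverse (return value only).

-- ===== PORT A =====
-- A's loop: data starts [0], each step asserts x[0] ≤ bef and appends data[-1] + x[0].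
-- data is kept head-first (rdata), so data[-1] is rdata.headD and 'return data' is rdata.reverse;
-- assert failure (excluded by Pre_) is modelled as 'none'.
def cumAuxA : List (Int × Int) → Int → List Int → Option (List Int)
  | [], _, rdata => some rdata.reverse
  | x :: xs, bef, rdata =>
      if x.1 ≤ bef then cumAuxA xs x.1 ((rdata.headD 0 + x.1) :: rdata) else none

def cum_energies (vec : List (Int × Int)) : List Int :=
  match PySem.List.pyGet? vec 0 with
  | none => []                       -- IndexError on empty vec; excluded by Pre_
  | some x0 => (cumAuxA vec (x0.1 + 1) [0]).getD []   -- none = AssertionError; excluded by Pre_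

-- ===== PORT B =====
-- B's reverse loop: s -= x[0]; rev.append(s)
def revLoop : List (Int × Int) → Int → List Int → List Int
  | [], _, rev => rev
  | x :: xs, s, rev => revLoop xs (s - x.1) (rev ++ [s - x.1])

def cum_energies_alt (vec : List (Int × Int)) : List Int :=
  -- all(vec[i][0] <= vec[i-1][0] for i in range(1, len(vec))) = chain of adjacent pairs;
  -- AssertionError (excluded by Pre_) is modelled as []
  if List.IsChain (fun a b : Int × Int => b.1 ≤ a.1) vec then
    let s := (vec.map Prod.fst).sum
    (revLoop vec.reverse s [s]).reverse
  else []

-- ===== PRECONDITION & SPEC =====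
-- Pre_ excludes the empty list (A raises IndexError) and inputs whose first coordinates
-- are not non-increasing (both A and B raise AssertionError).
def Pre_cum_energies (vec : List (Int × Int)) : Prop :=
  vec ≠ [] ∧ List.IsChain (fun a b : Int × Int => b.1 ≤ a.1) vec
instance (vec : List (Int × Int)) : Decidable (Pre_cum_energies vec) := by
  unfold Pre_cum_energies; infer_instance

def pvWitness_cum_energies : (List (Int × Int)) := [(3, 1), (3, 0), (1, 5)]

def Spec_cum_energies (vec : List (Int × Int)) (out : List Int) : Prop := out = cum_energies_alt vec
instance (vec : List (Int × Int)) (out : List Int) : Decidable (Spec_cum_energies vec out) := by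
  unfold Spec_cum_energies; infer_instance

-- ===== CLAIM (what is proved, stated in full; the proofs are below) =====
def Claim_equal_cum_energies : Prop := ∀ (vec : List (Int × Int)), Dom_cum_energies vec → Pre_cum_energies vec → Spec_cum_energies vec (cum_energies vec)

-- ===== LEMMAS AND PROOFS =====

lemma cumAuxA_eq : ∀ (vec : List (Int × Int)) (bef acc : Int) (rdata : List Int),
    (∀ x ∈ vec.head?, x.1 ≤ bef) →
    List.IsChain (fun a b : Int × Int => b.1 ≤ a.1) vec →
    cumAuxA vec bef (acc :: rdata)
      = some (rdata.reverse ++ List.scanl (· + ·) acc (vec.map Prod.fst)) := by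
  intro vec
  induction vec with
  | nil => intro bef acc rdata _ _; simp [cumAuxA]
  | cons x xs ih =>
      intro bef acc rdata hhead hch
      have hx : x.1 ≤ bef := hhead x (by simp)
      have hch' : List.IsChain (fun a b : Int × Int => b.1 ≤ a.1) xs := by
        cases xs with
        | nil => exact List.IsChain.nil
        | cons y ys => exact (List.isChain_cons_cons.mp hch).2
      have hhead' : ∀ y ∈ xs.head?, y.1 ≤ x.1 := by
        cases xs with
        | nil => intro y hy; simp at hy
        | cons y ys =>
            intro z hz
            have hz' : z = y := by simpa using hz.symm
            subst hz'
            exact (List.isChain_cons_cons.mp hch).1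
      simp only [cumAuxA, hx, if_pos]
      rw [show ((acc :: rdata).headD 0 + x.1) = acc + x.1 by simp]
      rw [ih x.1 (acc + x.1) (acc :: rdata) hhead' hch']
      simp [List.scanl]

lemma revLoop_eq : ∀ (xs : List (Int × Int)) (s : Int) (rev : List Int),
    revLoop xs s rev = rev ++ (List.scanl (fun a b => a - b) s (xs.map Prod.fst)).tail := by
  intro xs
  induction xs with
  | nil => intro s rev; simp [revLoop, List.scanl]
  | cons x xs ih =>
      intro s rev
      rw [revLoop, ih]
      cases hm : xs.map Prod.fst with
      | nil => simp [List.scanl, hm]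
      | cons g gs => simp [List.scanl, hm]

lemma scanl_add_append_singleton : ∀ (ys : List Int) (a x : Int),
    List.scanl (· + ·) a (ys ++ [x]) = List.scanl (· + ·) a ys ++ [a + ys.sum + x] := by
  intro ys
  induction ys with
  | nil => intro a x; simp [List.scanl]
  | cons y ys ih =>
      intro a x
      rw [List.cons_append, List.scanl_cons, ih]
      simp [add_assoc]

lemma scanl_sub_reverse : ∀ (r : List Int) (c : Int),
    (List.scanl (fun a b => a - b) c r).reverse
      = List.scanl (· + ·) (c - r.sum) r.reverse := by
  intro r
  induction r with
  | nil => intro c; simp [List.scanl]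
  | cons x xs ih =>
      intro c
      rw [List.scanl_cons, List.reverse_cons, ih, List.reverse_cons,
          scanl_add_append_singleton, List.sum_cons, List.sum_reverse]
      have h1 : c - x - xs.sum = c - (x + xs.sum) := by ring
      have h2 : c - (x + xs.sum) + xs.sum + x = c := by ring
      rw [h1, h2]

-- ===== VERDICT (by name: the statement is the Claim_ definition above) =====
theorem cum_energies_spec : Claim_equal_cum_energies := by
  intro vec _ hpre
  obtain ⟨hne, hch⟩ := hpre
  cases vec with
  | nil => exact absurd rfl hne
  | cons v vs =>
      unfold Spec_cum_energies cum_energies cum_energies_alt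
      have hget : PySem.List.pyGet? (v :: vs) 0 = some v := by
        simp [PySem.List.pyGet?, PySem.List.pyIdx?]
      rw [hget]
      have hhead : ∀ x ∈ (v :: vs).head?, x.1 ≤ v.1 + 1 := by
        intro x hx
        have hxv : x = v := by simpa using hx.symm
        subst hxv; omega
      show (cumAuxA (v :: vs) (v.1 + 1) [0]).getD [] = _
      rw [cumAuxA_eq (v :: vs) (v.1 + 1) 0 [] hhead hch]
      simp only [hch, if_pos, Option.getD_some, List.reverse_nil, List.nil_append]
      rw [revLoop_eq]
      set S := ((v :: vs).map Prod.fst).sum with hS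
      have hhd : List.scanl (fun a b => a - b) S ((v :: vs).reverse.map Prod.fst)
          = S :: (List.scanl (fun a b => a - b) S ((v :: vs).reverse.map Prod.fst)).tail := by
        cases hm : (v :: vs).reverse.map Prod.fst with
        | nil => simp [List.scanl]
        | cons g gs => simp [List.scanl]
      rw [show ([S] ++ (List.scanl (fun a b => a - b) S ((v :: vs).reverse.map Prod.fst)).tail)
            = List.scanl (fun a b => a - b) S ((v :: vs).reverse.map Prod.fst) by
        rw [hhd]; rfl]
      rw [show (v :: vs).reverse.map Prod.fst = ((v :: vs).map Prod.fst).reverse by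
        simp [List.map_reverse]]
      rw [scanl_sub_reverse, List.sum_reverse, List.reverse_reverse, sub_self]
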